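-- pv_equiv track=rewrite | github.com/HolyB/Coral_Creek | versions/v3/services/candidate_tracking_service.py | _iter_combo_keys
-- ===== SOURCE A (Python) =====
-- from itertools import combinations
-- from typing import Dict, Iterable, List, Optional, Sequence
--
-- CORE_TAGS = [
--     "DAY_BLUE",
--     "WEEK_BLUE",
--     "MONTH_BLUE",
--     "DAY_HEIMA",
--     "WEEK_HEIMA",
--     "MONTH_HEIMA",
--     "DAY_JUEDI",
--     "WEEK_JUEDI",
--     "MONTH_JUEDI",
--     "CHIP_DENSE",
--     "CHIP_BREAKOUT",
--     "CHIP_OVERHANG",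
--     "DUOKONGWANG_BUY",
--     "DUOKONGWANG_SELL",
-- ]
--
-- def _iter_combo_keys(tags: Iterable[str], max_size: int = 4) -> Iterable[str]:
--     uniq = sorted(set([t for t in tags if t in CORE_TAGS]))
--     if not uniq:
--         return []
--     combos: List[str] = []
--     for size in range(1, min(max_size, len(uniq)) + 1):
--         for item in combinations(uniq, size):
--             combos.append("+".join(item))
--     return combos
-- ===== SOURCE B (Python) =====
-- CORE_TAGS = [
--     "DAY_BLUE",
--     "WEEK_BLUE",
--     "MONTH_BLUE",
--     "DAY_HEIMA",
--     "WEEK_HEIMA",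
--     "MONTH_HEIMA",
--     "DAY_JUEDI",
--     "WEEK_JUEDI",
--     "MONTH_JUEDI",
--     "CHIP_DENSE",
--     "CHIP_BREAKOUT",
--     "CHIP_OVERHANG",
--     "DUOKONGWANG_BUY",
--     "DUOKONGWANG_SELL",
-- ]
--
--
-- def _iter_combo_keys(tags, max_size=4):
--     uniq = sorted({t for t in tags if t in CORE_TAGS})
--     if not uniq:
--         return []
--     limit = min(max_size, len(uniq))
--
--     def emit(pool, chosen, need):
--         # choose 'need' more tags from 'pool' at strictly increasing positions;
--         # a finished choice becomes its '+'-joined key immediately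
--         if need == 0:
--             return ["+".join(chosen)]
--         out = []
--         for j in range(len(pool) - need + 1):
--             out.extend(emit(pool[j + 1:], chosen + [pool[j]], need - 1))
--         return out
--
--     return [key for size in range(1, limit + 1) for key in emit(uniq, [], size)]
-- ===== Notes on version B (the rewrite author's own statement) =====
-- stated objective: alternative
-- what changed: Replaces itertools.combinations with a hand-written recursive generator that picks tags at strictly increasing positions and emits each '+'-joined key as soon as a choice is complete, concatenating sizes 1..min(max_size, len(uniq)) via a comprehension.
import Mathlib
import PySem

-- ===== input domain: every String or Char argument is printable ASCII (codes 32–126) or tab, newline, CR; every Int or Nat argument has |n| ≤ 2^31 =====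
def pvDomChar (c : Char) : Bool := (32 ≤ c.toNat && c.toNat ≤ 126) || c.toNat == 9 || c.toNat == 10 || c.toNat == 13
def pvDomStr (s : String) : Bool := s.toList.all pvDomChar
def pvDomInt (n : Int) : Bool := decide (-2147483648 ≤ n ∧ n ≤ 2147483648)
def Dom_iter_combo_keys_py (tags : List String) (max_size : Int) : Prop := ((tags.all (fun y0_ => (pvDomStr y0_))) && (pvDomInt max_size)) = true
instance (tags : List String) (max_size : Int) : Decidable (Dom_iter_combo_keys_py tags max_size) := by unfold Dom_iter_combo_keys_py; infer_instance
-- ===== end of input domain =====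

-- B replaces itertools.combinations with a recursive generator that emits each '+'-joined
-- key directly while choosing tags at strictly increasing positions (objective: alternative).

def pvCoreTags : List String :=
  ["DAY_BLUE", "WEEK_BLUE", "MONTH_BLUE", "DAY_HEIMA", "WEEK_HEIMA", "MONTH_HEIMA",
   "DAY_JUEDI", "WEEK_JUEDI", "MONTH_JUEDI", "CHIP_DENSE", "CHIP_BREAKOUT",
   "CHIP_OVERHANG", "DUOKONGWANG_BUY", "DUOKONGWANG_SELL"]

-- ===== PORT A =====
-- itertools.combinations(l, k) as a list of tuples (here: lists), in itertools' order
def pvComb : Nat → List String → List (List String)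
  | 0, _ => [[]]
  | _ + 1, [] => []
  | n + 1, x :: xs => (pvComb n xs).map (fun c => x :: c) ++ pvComb (n + 1) xs

def iter_combo_keys_py (tags : List String) (max_size : Int) : List String :=
  let uniq := PySem.List.sorted (PySem.Set.ofList (tags.filter (fun t => pvCoreTags.contains t))) (fun x => x) false
  if uniq = [] then []
  else
    (PySem.List.pyRange 1 (min max_size (uniq.length : Int) + 1) 1).foldl
      (fun combos size => combos ++ (pvComb size.toNat uniq).map (fun item => PySem.Str.join "+" item)) []

-- ===== PORT B =====
-- Source B's emit(pool, chosen, need); pool[j] is total in Python (j < len(pool)), ported as getD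
def pvEmit : List String → List String → Nat → List String
  | _, chosen, 0 => [PySem.Str.join "+" chosen]
  | pool, chosen, n + 1 =>
      (List.range (pool.length - n)).flatMap
        (fun j => pvEmit (pool.drop (j + 1)) (chosen ++ [pool.getD j ""]) n)

def iter_combo_keys_py_alt (tags : List String) (max_size : Int) : List String :=
  let uniq := PySem.List.sorted (PySem.Set.ofList (tags.filter (fun t => pvCoreTags.contains t))) (fun x => x) false
  if uniq = [] then []
  else
    let limit := min max_size (uniq.length : Int)
    (PySem.List.pyRange 1 (limit + 1) 1).flatMap (fun size => pvEmit uniq [] size.toNat)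

-- ===== PRECONDITION & SPEC =====
def Spec_iter_combo_keys_py (tags : List String) (max_size : Int) (out : List String) : Prop := out = iter_combo_keys_py_alt tags max_size
instance (tags : List String) (max_size : Int) (out : List String) : Decidable (Spec_iter_combo_keys_py tags max_size out) := by unfold Spec_iter_combo_keys_py; infer_instance

-- ===== CLAIM (what is proved, stated in full; the proofs are below) =====
def Claim_equal_iter_combo_keys_py : Prop := ∀ (tags : List String) (max_size : Int), Dom_iter_combo_keys_py tags max_size → Spec_iter_combo_keys_py tags max_size (iter_combo_keys_py tags max_size)

-- ===== LEMMAS AND PROOFS =====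

theorem pvComb_nil_of_lt : ∀ (l : List String) (k : Nat), l.length < k → pvComb k l = [] := by
  intro l
  induction l with
  | nil =>
      intro k hk
      match k, hk with
      | n + 1, _ => rfl
  | cons x xs ih =>
      intro k hk
      match k, hk with
      | n + 1, hk =>
        simp only [pvComb]
        have h1 : xs.length < n := by simp only [List.length_cons] at hk; omega
        rw [ih n h1, ih (n + 1) (by omega)]
        simp

theorem pvComb_succ_index (k : Nat) : ∀ (l : List String),
    pvComb (k + 1) l =
      (List.range (l.length - k)).flatMap
        (fun j => (pvComb k (l.drop (j + 1))).map (fun c => l.getD j "" :: c)) := by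
  intro l
  induction l with
  | nil => simp [pvComb]
  | cons x xs ih =>
      by_cases hk : xs.length < k
      · have h0 : (x :: xs).length - k = 0 := by simp only [List.length_cons]; omega
        rw [h0, pvComb_nil_of_lt (x :: xs) (k + 1) (by simp only [List.length_cons]; omega)]
        simp
      · have h1 : (x :: xs).length - k = (xs.length - k) + 1 := by
          simp only [List.length_cons]; omega
        rw [h1, List.range_succ_eq_map, List.flatMap_cons, List.flatMap_map]
        simp only [pvComb]
        rw [ih]
        simp [Nat.succ_eq_add_one]

theorem pvEmit_eq (k : Nat) : ∀ (pool chosen : List String),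
    pvEmit pool chosen k = (pvComb k pool).map (fun c => PySem.Str.join "+" (chosen ++ c)) := by
  induction k with
  | zero => intro pool chosen; simp [pvEmit, pvComb]
  | succ n ih =>
      intro pool chosen
      simp only [pvEmit]
      rw [pvComb_succ_index n pool, List.map_flatMap]
      apply List.flatMap_congr
      intro j hj
      rw [ih, List.map_map]
      congr 1
      funext c
      simp [List.append_assoc]

-- ===== VERDICT (by name: the statement is the Claim_ definition above) =====
theorem iter_combo_keys_py_spec : Claim_equal_iter_combo_keys_py := by
  intro tags max_size _
  unfold Spec_iter_combo_keys_py iter_combo_keys_py iter_combo_keys_py_alt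
  set uniq := PySem.List.sorted (PySem.Set.ofList (tags.filter (fun t => pvCoreTags.contains t))) (fun x => x) false with huniq
  by_cases h : uniq = []
  · simp [h]
  · simp only [if_neg h]
    rw [PySem.List.foldl_append_eq_flatMap]
    simp only [List.nil_append]
    apply List.flatMap_congr
    intro size hs
    rw [pvEmit_eq]
    simp
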